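-- pv_equiv track=rewrite | github.com/keepCoding01/Object-Oriented-Programming-OOP- | push/1.py | capitalOdd
-- ===== SOURCE A (Python) =====
-- def capitalOdd(str):
--     katakata = str.split()
--     hasil = []
--     for kata in katakata:
--         kataBaru = ""
--         for i in range(len(kata)):
--             if i % 2 == 0:
--                 kataBaru += kata[i].upper()
--             else:
--                 kataBaru += kata[i].lower()
--         hasil.append(kataBaru)
--     return '\n'.join(hasil)
-- ===== SOURCE B (Python) =====
-- def capitalOdd(str):
--     return '\n'.join(_cap(w) for w in str.split())
--
-- def _cap(w):
--     # consume the word two characters at a time: uppercase the first, lowercase the second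
--     it = iter(w)
--     parts = []
--     for a in it:
--         b = next(it, '')
--         parts.append(a.upper() + b.lower())
--     return ''.join(parts)
-- ===== Notes on version B (the rewrite author's own statement) =====
-- stated objective: alternative
-- what changed: Replaces the index loop with a parity test by a pairwise traversal that consumes two characters per step (uppercase the first, lowercase the second) over an iterator, joining per-pair fragments; no indices or parity arithmetic.
import Mathlib
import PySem

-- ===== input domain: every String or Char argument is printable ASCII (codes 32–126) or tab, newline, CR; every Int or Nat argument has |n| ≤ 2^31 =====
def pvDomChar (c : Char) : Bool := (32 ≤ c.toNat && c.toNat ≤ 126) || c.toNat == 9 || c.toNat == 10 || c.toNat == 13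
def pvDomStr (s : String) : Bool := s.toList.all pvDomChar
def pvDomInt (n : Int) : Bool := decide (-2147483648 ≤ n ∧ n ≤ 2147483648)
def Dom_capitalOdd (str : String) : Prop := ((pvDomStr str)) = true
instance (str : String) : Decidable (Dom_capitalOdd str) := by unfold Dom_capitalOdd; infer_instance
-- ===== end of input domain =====

-- B traverses each word two characters at a time (no indices, no parity test) instead of A's index loop; objective: alternative.

-- ===== PORT A =====
-- inner loop of A: for i in range(len(kata)): kataBaru += kata[i].upper()/.lower()
-- (kata[i] is always in range here, so pyGetD's default is never used)
def capitalOddWordA (kata : String) : List Char :=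
  (PySem.List.pyRange 0 (PySem.Str.len kata)).foldl
    (fun acc i =>
      if PySem.Int.mod i 2 = 0
      then acc ++ PySem.Chars.upper [PySem.List.pyGetD kata.toList i ' ']
      else acc ++ PySem.Chars.lower [PySem.List.pyGetD kata.toList i ' ']) []

def capitalOdd (str : String) : String :=
  let katakata := PySem.Str.split₀ str
  let hasil := katakata.foldl (fun hasil kata => hasil ++ [String.ofList (capitalOddWordA kata)]) []
  PySem.Str.join "\n" hasil

-- ===== PORT B =====
-- _cap in Source B: per step take a, then b = next(it, '') and append a.upper() + b.lower()
-- (the one-element case is the step where next returns the fill '' and ''.lower() = '')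
def capWordB : List Char → List Char
  | [] => []
  | [a] => PySem.Chars.upper [a] ++ PySem.Chars.lower []
  | a :: b :: rest => PySem.Chars.upper [a] ++ PySem.Chars.lower [b] ++ capWordB rest

def capitalOdd_alt (str : String) : String :=
  PySem.Str.join "\n" ((PySem.Str.split₀ str).map (fun w => String.ofList (capWordB w.toList)))

-- ===== PRECONDITION & SPEC =====
def Spec_capitalOdd (str : String) (out : String) : Prop := out = capitalOdd_alt str
instance (str : String) (out : String) : Decidable (Spec_capitalOdd str out) := by unfold Spec_capitalOdd; infer_instance

-- ===== CLAIM (what is proved, stated in full; the proofs are below) =====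
def Claim_equal_capitalOdd : Prop := ∀ (str : String), Dom_capitalOdd str → Spec_capitalOdd str (capitalOdd str)

-- ===== LEMMAS AND PROOFS =====

-- the parity-indexed fold over enumerate equals the two-at-a-time recursion
theorem enumFold_eq_capWordB (cs : List Char) (k : Int) (acc : List Char) :
    (PySem.List.enumerate cs (2 * k)).foldl
      (fun acc p =>
        if PySem.Int.mod p.1 2 = 0
        then acc ++ PySem.Chars.upper [p.2]
        else acc ++ PySem.Chars.lower [p.2]) acc = acc ++ capWordB cs := by
  induction cs using capWordB.induct generalizing k acc with
  | case1 => simp [capWordB, PySem.List.enumerate_nil]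
  | case2 c =>
      have h0 : PySem.Int.mod (2 * k) 2 = 0 := by
        simp [PySem.Int.mod]
      simp [capWordB, PySem.List.enumerate_cons, PySem.List.enumerate_nil, PySem.Chars.lower]
  | case3 a b rest ih =>
      have h0 : PySem.Int.mod (2 * k) 2 = 0 := by
        simp [PySem.Int.mod]
      have h1 : PySem.Int.mod (2 * k + 1) 2 ≠ 0 := by
        simp [PySem.Int.mod]
      have h2 : 2 * k + 1 + 1 = 2 * (k + 1) := by ring
      simp only [PySem.List.enumerate_cons, List.foldl_cons, h0, h1, if_true, if_false, h2]
      rw [ih (k + 1)]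
      simp [capWordB]

theorem wordA_eq_wordB (kata : String) : capitalOddWordA kata = capWordB kata.toList := by
  unfold capitalOddWordA
  have hlen : PySem.Str.len kata = PySem.List.len kata.toList := by
    simp [PySem.Str.len, PySem.List.len]
  rw [hlen]
  have henum := PySem.List.enumerate_eq_map_pyRange (xs := kata.toList) ' '
  have : (PySem.List.pyRange 0 (PySem.List.len kata.toList)).foldl
      (fun acc i =>
        if PySem.Int.mod i 2 = 0
        then acc ++ PySem.Chars.upper [PySem.List.pyGetD kata.toList i ' ']
        else acc ++ PySem.Chars.lower [PySem.List.pyGetD kata.toList i ' ']) []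
      = (PySem.List.enumerate kata.toList).foldl
        (fun acc p =>
          if PySem.Int.mod p.1 2 = 0
          then acc ++ PySem.Chars.upper [p.2]
          else acc ++ PySem.Chars.lower [p.2]) [] := by
    rw [henum, List.foldl_map]
  rw [this]
  have := enumFold_eq_capWordB kata.toList 0 []
  simpa [PySem.List.enumerate] using this

-- ===== VERDICT (by name: the statement is the Claim_ definition above) =====
theorem capitalOdd_spec : Claim_equal_capitalOdd := by
  intro str _
  unfold Spec_capitalOdd capitalOdd capitalOdd_alt
  dsimp only
  rw [PySem.List.foldl_append_singleton_eq_map]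
  simp [wordA_eq_wordB]
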